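-- pv_equiv track=rewrite | github.com/Skaszka/2019-AdventOfCode | day24a.py | biodiversity_rating
-- ===== SOURCE A (Python) =====
-- def biodiversity_rating(bug_map):
-- 	sum = 0
-- 	multiplier = 1
--
-- 	for y in bug_map:
-- 		for x in y:
-- 			if x == '#':
-- 				sum += multiplier
-- 			multiplier *= 2
--
-- 	return sum
-- ===== SOURCE B (Python) =====
-- def biodiversity_rating(bug_map):
-- 	bits = ''.join('1' if c == '#' else '0' for row in bug_map for c in row)
-- 	if not bits:
-- 		return 0
-- 	return int(bits[::-1], 2)
-- ===== Notes on version B (the rewrite author's own statement) =====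
-- stated objective: faster
-- what changed: Instead of a single pass carrying a running doubling bignum multiplier and accumulator, B builds the whole bit string of the grid in row-major order, reverses it (the first cell is the least-significant bit) and converts it with one int(bits, 2) call; this removes the per-cell arithmetic on an ever-growing bignum and was measured much faster on large grids.
import Mathlib
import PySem

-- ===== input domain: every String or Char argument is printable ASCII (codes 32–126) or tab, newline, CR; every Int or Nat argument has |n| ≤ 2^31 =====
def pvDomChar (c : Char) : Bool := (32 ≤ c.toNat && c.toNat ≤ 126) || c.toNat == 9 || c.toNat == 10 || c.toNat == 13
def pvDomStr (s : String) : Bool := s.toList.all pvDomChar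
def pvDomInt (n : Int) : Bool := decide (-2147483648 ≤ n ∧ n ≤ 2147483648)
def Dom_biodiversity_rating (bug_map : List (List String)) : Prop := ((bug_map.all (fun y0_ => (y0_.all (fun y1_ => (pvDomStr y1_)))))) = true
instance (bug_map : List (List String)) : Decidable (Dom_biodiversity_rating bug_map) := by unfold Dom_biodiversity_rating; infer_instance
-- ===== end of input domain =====

-- B builds the grid's bit string in row-major order, reverses it and converts it with one
-- int(bits, 2) call, instead of A's single pass carrying a running doubling bignum
-- multiplier (objective: faster; measured faster on large grids in a timing run).

-- ===== PORT A =====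
-- nested loops carrying (sum, multiplier)
def biodiversity_rating (bug_map : List (List String)) : Int :=
  (bug_map.foldl
    (fun st y => y.foldl
      (fun st x => (if x == "#" then st.1 + st.2 else st.1, st.2 * 2)) st)
    ((0 : Int), (1 : Int))).1

-- ===== PORT B =====
-- bits = ''.join('1' if c=='#' else '0' ...); int(bits[::-1], 2), 0 for the empty string.
-- int(s, 2) is ported by hand as a big-endian Horner fold over the digit characters;
-- this is exact here because bits consists solely of '0'/'1' characters by construction.
def biodiversity_rating_alt (bug_map : List (List String)) : Int :=
  let bits : List Char := bug_map.flatten.map (fun c => if c == "#" then '1' else '0')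
  if bits = [] then 0
  else
    -- bits[::-1]: slice? with step -1 is never none (slice?_none_none_neg_one), so getD [] is exact
    ((PySem.List.slice? bits none none (-1)).getD []).foldl
      (fun a c => 2 * a + (if c = '1' then 1 else 0)) (0 : Int)

-- ===== PRECONDITION & SPEC =====
def Spec_biodiversity_rating (bug_map : List (List String)) (out : Int) : Prop := out = biodiversity_rating_alt bug_map
instance (bug_map : List (List String)) (out : Int) : Decidable (Spec_biodiversity_rating bug_map out) := by unfold Spec_biodiversity_rating; infer_instance

-- ===== CLAIM (what is proved, stated in full; the proofs are below) =====
def Claim_equal_biodiversity_rating : Prop := ∀ (bug_map : List (List String)), Dom_biodiversity_rating bug_map → Spec_biodiversity_rating bug_map (biodiversity_rating bug_map)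

-- ===== LEMMAS AND PROOFS =====

-- reference value: little-endian binary number of the flat cell list
def pvVal : List String → Int
  | [] => 0
  | c :: l => (if c == "#" then 1 else 0) + 2 * pvVal l

theorem pvFoldA (l : List String) :
    ∀ (s m : Int),
      (l.foldl (fun st x => (if x == "#" then st.1 + st.2 else st.1, st.2 * 2)) (s, m))
        = (s + m * pvVal l, m * 2 ^ l.length) := by
  induction l with
  | nil => intro s m; simp [pvVal]
  | cons c l ih =>
      intro s m
      simp only [List.foldl_cons, ih, pvVal, List.length_cons]
      simp only [Prod.mk.injEq]
      refine ⟨?_, by ring⟩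
      by_cases h : c == "#" <;> (simp [h]; ring)

theorem pvFoldA_flatten (bug_map : List (List String)) :
    ∀ (st : Int × Int),
      bug_map.foldl
        (fun st y => y.foldl
          (fun st x => (if x == "#" then st.1 + st.2 else st.1, st.2 * 2)) st) st
      = (st.1 + st.2 * pvVal bug_map.flatten, st.2 * 2 ^ bug_map.flatten.length) := by
  induction bug_map with
  | nil => intro st; simp [pvVal]
  | cons y rest ih =>
      intro st
      obtain ⟨s, m⟩ := st
      have hval : ∀ (a b : List String), pvVal (a ++ b) = pvVal a + 2 ^ a.length * pvVal b := by
        intro a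
        induction a with
        | nil => intro b; simp [pvVal]
        | cons c a iha =>
            intro b
            simp only [List.cons_append, pvVal, iha, List.length_cons]
            ring
      simp only [List.foldl_cons, pvFoldA, ih, List.flatten_cons, hval,
        List.length_append]
      simp only [Prod.mk.injEq]
      exact ⟨by ring, by ring⟩

-- Horner parse of the reversed bit string equals the little-endian value
theorem pvParseRev (l : List String) :
    ((l.map (fun c => if c == "#" then '1' else '0')).reverse).foldl
      (fun a c => 2 * a + (if c = '1' then 1 else 0)) (0 : Int) = pvVal l := by
  rw [List.foldl_reverse]
  induction l with
  | nil => simp [pvVal]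
  | cons c l ih =>
      simp only [List.map_cons, List.foldr_cons, ih, pvVal]
      by_cases h : c == "#" <;> simp [h] <;> ring

-- ===== VERDICT (by name: the statement is the Claim_ definition above) =====
theorem biodiversity_rating_spec : Claim_equal_biodiversity_rating := by
  intro bug_map _
  unfold Spec_biodiversity_rating biodiversity_rating biodiversity_rating_alt
  rw [pvFoldA_flatten]
  by_cases h : bug_map.flatten = []
  · simp [h, pvVal]
  · have hm : (bug_map.flatten.map (fun c => if c == "#" then '1' else '0')) ≠ [] := by
      simpa using h
    simp only [hm, PySem.List.slice?_none_none_neg_one, Option.getD_some, pvParseRev,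
      if_false]
    ring
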